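-- pv_equiv track=rewrite | github.com/nicovank/microperf | perf-script.py | strip_cxx_templates
-- ===== SOURCE A (Python) =====
-- def strip_cxx_templates(symbol):
--     depth = 0
--     result = ""
--     for c in symbol:
--         if c == "<":
--             depth += 1
--         elif c == ">":
--             depth -= 1
--         elif depth == 0:
--             result += c
--     return result
-- ===== SOURCE B (Python) =====
-- def strip_cxx_templates(symbol):
--     # Two-pass: exclusive prefix-sum of bracket deltas gives the nesting depth
--     # before each character; keep depth-0 characters that are not brackets.
--     deltas = [1 if c == "<" else -1 if c == ">" else 0 for c in symbol]
--     depths = [0]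
--     for d in deltas:
--         depths.append(depths[-1] + d)
--     return "".join(c for c, depth in zip(symbol, depths) if depth == 0 and c not in "<>")
-- ===== Notes on version B (the rewrite author's own statement) =====
-- stated objective: alternative
-- what changed: Replaced the single stateful loop with repeated string concatenation by a two-pass pipeline: an exclusive prefix-sum of bracket deltas computes the nesting depth before each character, then a zip+filter+join keeps depth-0 non-bracket characters.
import Mathlib
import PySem

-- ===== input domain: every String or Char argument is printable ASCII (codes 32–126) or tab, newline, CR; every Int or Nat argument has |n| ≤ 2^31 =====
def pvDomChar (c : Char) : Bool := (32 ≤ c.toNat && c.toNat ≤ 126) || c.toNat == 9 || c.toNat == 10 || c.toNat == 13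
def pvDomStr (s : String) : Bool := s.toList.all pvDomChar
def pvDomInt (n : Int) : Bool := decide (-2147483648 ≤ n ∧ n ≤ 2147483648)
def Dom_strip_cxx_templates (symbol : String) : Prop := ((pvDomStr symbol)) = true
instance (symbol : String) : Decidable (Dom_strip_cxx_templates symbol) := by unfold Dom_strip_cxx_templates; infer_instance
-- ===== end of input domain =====

-- B replaces A's stateful accumulate-while-scanning loop by a prefix-sum of bracket
-- deltas followed by a zip/filter/join pass (alternative decomposition, same result).

-- ===== PORT A =====
-- one fold carrying (depth, result), exactly A's loop
def strip_cxx_templates (symbol : String) : String :=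
  (symbol.toList.foldl
    (fun (st : Int × List Char) c =>
      if c = '<' then (st.1 + 1, st.2)
      else if c = '>' then (st.1 - 1, st.2)
      else if st.1 = 0 then (st.1, st.2 ++ [c])
      else st)
    (0, [])).2 |> String.ofList

-- ===== PORT B =====
def pvDelta (c : Char) : Int := if c = '<' then 1 else if c = '>' then -1 else 0

def strip_cxx_templates_alt (symbol : String) : String :=
  let deltas := symbol.toList.map pvDelta
  let depths := List.scanl (fun a b => a + b) 0 deltas
  (((symbol.toList.zip depths).filter
      (fun p => decide (p.2 = 0 ∧ p.1 ≠ '<' ∧ p.1 ≠ '>'))).map Prod.fst) |> String.ofList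

-- ===== PRECONDITION & SPEC =====
def Spec_strip_cxx_templates (symbol : String) (out : String) : Prop := out = strip_cxx_templates_alt symbol
instance (symbol : String) (out : String) : Decidable (Spec_strip_cxx_templates symbol out) := by unfold Spec_strip_cxx_templates; infer_instance

-- ===== CLAIM (what is proved, stated in full; the proofs are below) =====
def Claim_equal_strip_cxx_templates : Prop := ∀ (symbol : String), Dom_strip_cxx_templates symbol → Spec_strip_cxx_templates symbol (strip_cxx_templates symbol)

-- ===== LEMMAS AND PROOFS =====

-- characterisation of A's fold against B's zip-with-prefix-depths pipeline
theorem pv_fold_eq (l : List Char) :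
    ∀ (d : Int) (acc : List Char),
    (l.foldl
      (fun (st : Int × List Char) c =>
        if c = '<' then (st.1 + 1, st.2)
        else if c = '>' then (st.1 - 1, st.2)
        else if st.1 = 0 then (st.1, st.2 ++ [c])
        else st)
      (d, acc)).2
    = acc ++ ((l.zip (List.scanl (fun a b => a + b) d (l.map pvDelta))).filter
        (fun p => decide (p.2 = 0 ∧ p.1 ≠ '<' ∧ p.1 ≠ '>'))).map Prod.fst := by
  induction l with
  | nil => intro d acc; simp
  | cons c l ih =>
    intro d acc
    simp only [List.map_cons, List.scanl_cons, List.foldl_cons, List.zip_cons_cons,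
      List.filter_cons]
    by_cases h1 : c = '<'
    · subst h1
      simp only [pvDelta, ih]
      simp
    · by_cases h2 : c = '>'
      · subst h2
        simp only [pvDelta, if_neg h1, ih]
        simp [h1, sub_eq_add_neg]
      · by_cases h3 : d = 0
        · subst h3
          simp only [if_neg h1, if_neg h2, ih]
          simp [pvDelta, h1, h2]
        · simp only [if_neg h1, if_neg h2, if_neg h3, ih]
          simp [pvDelta, h1, h2, h3]

-- ===== VERDICT (by name: the statement is the Claim_ definition above) =====
theorem strip_cxx_templates_spec : Claim_equal_strip_cxx_templates := by
  intro symbol _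
  unfold Spec_strip_cxx_templates strip_cxx_templates strip_cxx_templates_alt
  rw [pv_fold_eq]
  simp
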